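-- pv_equiv track=rewrite | github.com/Speedor/MagiCookie | magi.py | hex_join
-- ===== SOURCE A (Python) =====
-- def hex_join(arg: str) -> str:
--     _0x4b082b = [0xf, 0x23, 0x1d, 0x18, 0x21, 0x10, 0x1, 0x26, 0xa, 0x9, 0x13, 0x1f, 0x28, 0x1b, 0x16, 0x17, 0x19, 0xd,
--                  0x6, 0xb, 0x27, 0x12, 0x14, 0x8, 0xe, 0x15, 0x20, 0x1a, 0x2, 0x1e, 0x7, 0x4, 0x11, 0x5, 0x3, 0x1c,
--                  0x22, 0x25, 0xc, 0x24]
--     _0x4da0dc = [''] * 40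
--     for _0x20a7bf in range(0, len(arg)):
--         _0x385ee3 = arg[_0x20a7bf]
--         for _0x217721 in range(0, len(_0x4b082b)):
--             if _0x4b082b[_0x217721] == _0x20a7bf + 0x1:
--                 _0x4da0dc[_0x217721] = _0x385ee3
--     return ''.join(_0x4da0dc)
-- ===== SOURCE B (Python) =====
-- def hex_join(arg: str) -> str:
--     _0x4b082b = [0xf, 0x23, 0x1d, 0x18, 0x21, 0x10, 0x1, 0x26, 0xa, 0x9, 0x13, 0x1f, 0x28, 0x1b, 0x16, 0x17, 0x19, 0xd,
--                  0x6, 0xb, 0x27, 0x12, 0x14, 0x8, 0xe, 0x15, 0x20, 0x1a, 0x2, 0x1e, 0x7, 0x4, 0x11, 0x5, 0x3, 0x1c,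
--                  0x22, 0x25, 0xc, 0x24]
--     return ''.join(arg[p - 1] if p <= len(arg) else '' for p in _0x4b082b)
-- ===== Notes on version B (the rewrite author's own statement) =====
-- stated objective: faster
-- what changed: A scatters: for every input character it scans all 40 permutation slots to find where it lands; B gathers: one pass over the 40 slots pulling arg[p-1] when p <= len(arg), so the nested input-by-slot search disappears and work no longer grows with the input length.
import Mathlib
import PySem

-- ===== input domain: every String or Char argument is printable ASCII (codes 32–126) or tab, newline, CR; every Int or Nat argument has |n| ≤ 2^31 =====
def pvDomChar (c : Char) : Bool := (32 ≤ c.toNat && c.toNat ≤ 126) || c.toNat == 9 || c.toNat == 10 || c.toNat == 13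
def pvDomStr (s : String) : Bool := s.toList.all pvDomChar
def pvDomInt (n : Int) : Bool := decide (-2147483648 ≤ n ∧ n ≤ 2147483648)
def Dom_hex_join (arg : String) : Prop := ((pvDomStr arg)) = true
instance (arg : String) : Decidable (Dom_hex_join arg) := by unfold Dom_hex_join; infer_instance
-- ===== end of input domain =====

-- B replaces A's nested scatter (each input character scans all 40 permutation slots)
-- by a single gather pass over the 40 slots: simpler, one loop instead of two.

-- the fixed permutation literal shared by both Python sources
def hexPerm : List Nat :=
  [15, 35, 29, 24, 33, 16, 1, 38, 10, 9, 19, 31, 40, 27, 22, 23, 25, 13, 6, 11,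
   39, 18, 20, 8, 14, 21, 32, 26, 2, 30, 7, 4, 17, 5, 3, 28, 34, 37, 12, 36]

-- ===== PORT A =====
-- literal transliteration of A: outer loop over the input indices, inner loop over
-- the 40 permutation slots, assigning into a 40-slot list, then ''.join
def hex_join (arg : String) : String :=
  let chars := arg.toList
  let out := (List.range chars.length).foldl
    (fun acc i =>
      let c := chars.getD i ' '
      (List.range hexPerm.length).foldl
        (fun acc2 j => if hexPerm.getD j 0 = i + 1 then acc2.set j (String.ofList [c]) else acc2)
        acc)
    (List.replicate 40 "")
  String.join out

-- ===== PORT B =====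
-- transliteration of B: ''.join(arg[p-1] if p <= len(arg) else '' for p in perm)
def hex_join_alt (arg : String) : String :=
  String.join (hexPerm.map (fun p =>
    if p ≤ arg.toList.length then String.ofList [arg.toList.getD (p - 1) ' '] else ""))

-- ===== PRECONDITION & SPEC =====
def Spec_hex_join (arg : String) (out : String) : Prop := out = hex_join_alt arg
instance (arg : String) (out : String) : Decidable (Spec_hex_join arg out) := by unfold Spec_hex_join; infer_instance

-- ===== CLAIM (what is proved, stated in full; the proofs are below) =====
def Claim_equal_hex_join : Prop := ∀ (arg : String), Dom_hex_join arg → Spec_hex_join arg (hex_join arg)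

-- ===== LEMMAS AND PROOFS =====

-- pushing a fixed head through the inner set-fold (indices shifted by one)
lemma foldl_cons_set {α : Type} (P : Nat → Prop) [DecidablePred P] (c y : α) :
    ∀ (L : List Nat) (ys : List α),
      L.foldl (fun a j => if P j then a.set (j + 1) c else a) (y :: ys)
        = y :: L.foldl (fun a j => if P j then a.set j c else a) ys := by
  intro L
  induction L with
  | nil => intro ys; simp
  | cons j L ih =>
    intro ys
    by_cases h : P j <;> simp [h, ih]

-- A's inner loop is a positional overwrite of the slots where P holds
lemma foldl_set_eq_mapIdx {α : Type} (acc : List α) (P : Nat → Prop) [DecidablePred P] (c : α) :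
      (List.range acc.length).foldl (fun a j => if P j then a.set j c else a) acc
        = acc.mapIdx (fun j x => if P j then c else x) := by
  induction acc generalizing P with
  | nil => simp
  | cons x xs ih =>
    rw [show (x :: xs).length = xs.length + 1 from rfl, List.range_succ_eq_map]
    simp only [List.foldl_cons, List.foldl_map]
    rw [List.mapIdx_cons]
    by_cases h : P 0
    · simp only [h, if_pos, List.set_cons_zero]
      rw [foldl_cons_set (fun j => P (j + 1)) c c (List.range xs.length) xs]
      rw [ih (fun j => P (j + 1))]
    · simp only [h, if_false]
      rw [foldl_cons_set (fun j => P (j + 1)) c x (List.range xs.length) xs]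
      rw [ih (fun j => P (j + 1))]

lemma mapIdx_map_range {α β : Type} (n : Nat) (g : Nat → α) (h : Nat → α → β) :
    ((List.range n).map g).mapIdx h = (List.range n).map (fun j => h j (g j)) := by
  apply List.ext_getElem
  · simp
  · intro i h1 h2
    simp [List.getElem_mapIdx]

-- map over a list as map over its index range
lemma map_eq_range_map {α β : Type} (l : List α) (d : α) (f : α → β) :
    l.map f = (List.range l.length).map (fun j => f (l.getD j d)) := by
  apply List.ext_getElem
  · simp
  · intro i h1 h2
    have hi : i < l.length := by simpa using h1
    simp [List.getD, List.getElem?_eq_getElem hi]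

-- every permutation entry is ≥ 1
lemma hexPerm_pos : ∀ j, j < 40 → 1 ≤ hexPerm.getD j 0 := by decide

lemma hexPerm_len : hexPerm.length = 40 := by decide

-- loop invariant: after consuming the first k characters, slot j holds the character
-- whose 1-based index is hexPerm[j], provided that index is ≤ k, and "" otherwise
lemma outer_inv (chars : List Char) (k : Nat) :
    (List.range k).foldl
      (fun acc i =>
        let c := chars.getD i ' '
        (List.range hexPerm.length).foldl
          (fun acc2 j => if hexPerm.getD j 0 = i + 1 then acc2.set j (String.ofList [c]) else acc2)
          acc)
      (List.replicate 40 "")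
    = (List.range 40).map (fun j =>
        if hexPerm.getD j 0 ≤ k then String.ofList [chars.getD (hexPerm.getD j 0 - 1) ' '] else "") := by
  induction k with
  | zero =>
    rw [List.range_zero, List.foldl_nil]
    have h : ∀ j ∈ List.range 40,
        (if hexPerm.getD j 0 ≤ 0 then String.ofList [chars.getD (hexPerm.getD j 0 - 1) ' '] else "")
          = (fun _ : Nat => ("" : String)) j := by
      intro j hj
      have := hexPerm_pos j (List.mem_range.mp hj)
      simp only []
      rw [if_neg]
      omega
    rw [List.map_congr_left h, List.map_const', List.length_range]
  | succ k ih =>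
    rw [List.range_succ, List.foldl_append, ih, List.foldl_cons, List.foldl_nil]
    simp only []
    have h2 := foldl_set_eq_mapIdx
      ((List.range 40).map (fun j =>
        if hexPerm.getD j 0 ≤ k then String.ofList [chars.getD (hexPerm.getD j 0 - 1) ' '] else ""))
      (fun j => hexPerm.getD j 0 = k + 1) (String.ofList [chars.getD k ' '])
    simp only [List.length_map, List.length_range] at h2
    rw [hexPerm_len, h2, mapIdx_map_range]
    apply List.map_congr_left
    intro j hj
    have hpos := hexPerm_pos j (List.mem_range.mp hj)
    by_cases he : hexPerm.getD j 0 = k + 1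
    · rw [if_pos he, if_pos (by omega)]
      rw [show hexPerm.getD j 0 - 1 = k by omega]
    · rw [if_neg he]
      by_cases hle : hexPerm.getD j 0 ≤ k
      · rw [if_pos hle, if_pos (by omega)]
      · rw [if_neg hle, if_neg (by omega)]

-- ===== VERDICT (by name: the statement is the Claim_ definition above) =====
theorem hex_join_spec : Claim_equal_hex_join := by
  intro arg _
  unfold Spec_hex_join hex_join hex_join_alt
  simp only []
  rw [outer_inv arg.toList arg.toList.length,
    map_eq_range_map hexPerm 0 (fun p =>
      if p ≤ arg.toList.length then String.ofList [arg.toList.getD (p - 1) ' '] else ""),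
    hexPerm_len]
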